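-- pv_equiv track=rewrite | github.com/mesh404-repo/kira-term | source/extensions/morph.show_info/morph/show_info/prim_info.py | _flatten_with_wrap
-- ===== SOURCE A (Python) =====
-- from typing import List, Optional, Tuple
--
-- CHARS_PER_LINE = 40
--
-- def _wrap_line(line: str, max_chars: int = CHARS_PER_LINE) -> List[str]:
--     """한 줄을 max_chars를 넘지 않도록 여러 줄로 나눔. 가능하면 공백 위치에서 끊음."""
--     if not line or len(line) <= max_chars:
--         return [line] if line else []
--     result = []
--     rest = line
--     while rest:
--         if len(rest) <= max_chars:
--             result.append(rest)
--             break
--         chunk = rest[: max_chars + 1]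
--         last_space = chunk.rfind(" ")
--         if last_space > max_chars // 2:
--             split_at = last_space
--         else:
--             split_at = max_chars
--         result.append(rest[:split_at].strip())
--         rest = rest[split_at:].strip()
--     return result
--
-- def _flatten_with_wrap(raw_lines: List[str]) -> List[str]:
--     """원본 줄 리스트에서 긴 줄은 _wrap_line으로 나눈 뒤, 한 리스트로 펼쳐 반환."""
--     out: List[str] = []
--     for line in raw_lines:
--         if not line:
--             out.append("")
--             continue
--         for wrapped in _wrap_line(line):
--             out.append(wrapped)
--     return out
-- ===== SOURCE B (Python) =====
-- from typing import List
--
-- CHARS_PER_LINE = 40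
--
--
-- def _flatten_with_wrap(raw_lines: List[str]) -> List[str]:
--     """Single-pass index-pointer wrap: no repeated suffix slicing, O(len) per line."""
--     out: List[str] = []
--     for line in raw_lines:
--         if not line:
--             out.append("")
--         elif len(line) <= CHARS_PER_LINE:
--             out.append(line)
--         else:
--             i, j = 0, len(line)
--             while i < j:
--                 if j - i <= CHARS_PER_LINE:
--                     out.append(line[i:j])
--                     break
--                 # highest space position within the first CHARS_PER_LINE+1 chars
--                 k = i + CHARS_PER_LINE
--                 while k >= i and line[k] != " ":
--                     k -= 1
--                 if k - i > CHARS_PER_LINE // 2: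
--                     split = k
--                 else:
--                     split = i + CHARS_PER_LINE
--                 # emit line[i:split] stripped, via pointers
--                 p, q = i, split
--                 while p < q and line[p].isspace():
--                     p += 1
--                 while q > p and line[q - 1].isspace():
--                     q -= 1
--                 out.append(line[p:q])
--                 # advance to the stripped remainder line[split:j]
--                 i = split
--                 while i < j and line[i].isspace():
--                     i += 1
--                 while j > i and line[j - 1].isspace():
--                     j -= 1
--     return out
-- ===== Notes on version B (the rewrite author's own statement) =====
-- stated objective: faster
-- what changed: A re-slices the remaining suffix of the line (rest = rest[split_at:].strip(), plus rest[:41] and rest[:split_at] copies) on every wrap iteration, which is O(L^2) per long line; B never slices the suffix: it keeps index pointers (i, j) into the original line, finds the split point by a bounded backward scan and strips whitespace by moving the pointers, extracting each output piece exactly once, O(L) per line.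
import Mathlib
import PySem

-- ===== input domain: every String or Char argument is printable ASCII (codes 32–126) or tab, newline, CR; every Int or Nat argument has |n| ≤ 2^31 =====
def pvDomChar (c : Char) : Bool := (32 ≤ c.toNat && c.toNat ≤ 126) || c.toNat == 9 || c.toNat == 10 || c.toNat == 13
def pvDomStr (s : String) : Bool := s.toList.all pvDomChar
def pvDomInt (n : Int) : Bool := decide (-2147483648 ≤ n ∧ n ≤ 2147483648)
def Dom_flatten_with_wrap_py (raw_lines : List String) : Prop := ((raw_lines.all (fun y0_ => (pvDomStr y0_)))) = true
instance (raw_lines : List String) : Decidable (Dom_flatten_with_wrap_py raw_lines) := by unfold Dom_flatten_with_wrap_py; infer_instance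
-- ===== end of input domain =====

-- B replaces A's repeated suffix-slicing wrap loop by a single index-pointer scan per line
-- (skip whitespace and find the split point by moving indices); measured faster, return value proved equal on all inputs.

-- ===== PORT A =====
-- the while-loop of _wrap_line; the fuel only totalises the loop (each iteration
-- strictly shortens rest, so rest.length is always enough fuel; result is A's accumulator)
def pvWrapLoopAGo : Nat → List Char → List (List Char) → List (List Char)
  | 0, _, result => result
  | fuel + 1, rest, result =>
    if rest = [] then result
    else if rest.length ≤ 40 then result ++ [rest]
    else
      let chunk := PySem.List.slice rest none (some 41)          -- rest[: max_chars + 1]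
      let last_space := PySem.Chars.rfind chunk [' ']            -- chunk.rfind(" ")
      let split_at : Int := if last_space > 20 then last_space else 40   -- 20 = max_chars // 2
      let piece := PySem.Chars.strip (PySem.List.slice rest none (some split_at))
      let rest' := PySem.Chars.strip (PySem.List.slice rest (some split_at) none)
      pvWrapLoopAGo fuel rest' (result ++ [piece])

def pvWrapLoopA (rest : List Char) (result : List (List Char)) : List (List Char) :=
  pvWrapLoopAGo rest.length rest result

-- _wrap_line(line) (max_chars = CHARS_PER_LINE = 40)
def pvWrapLineA (line : List Char) : List (List Char) :=
  if line.isEmpty || line.length ≤ 40 then (if !line.isEmpty then [line] else [])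
  else pvWrapLoopA line []

def flatten_with_wrap_py (raw_lines : List String) : List String :=
  raw_lines.foldl (fun out line =>
    if line.toList.isEmpty then out ++ [""]
    else out ++ (pvWrapLineA line.toList).map String.ofList) []

-- ===== PORT B =====
-- line[k] (B only reads indices that are in range)
def pvCharAt (cs : List Char) (k : Int) : Char := cs.getD k.toNat '\x00'

-- while k >= i and line[k] != " ": k -= 1   (fuel = number of remaining candidate indices)
def pvScanBackGo (cs : List Char) (i : Int) : Nat → Int → Int
  | 0, k => k
  | fuel + 1, k =>
    if i ≤ k then
      if pvCharAt cs k = ' ' then k else pvScanBackGo cs i fuel (k - 1)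
    else k

def pvScanBack (cs : List Char) (i k : Int) : Int := pvScanBackGo cs i (k + 1 - i).toNat k

-- while i < j and line[i].isspace(): i += 1
def pvSkipFwdGo (cs : List Char) (j : Nat) : Nat → Nat → Nat
  | 0, i => i
  | fuel + 1, i =>
    if i < j then
      if PySem.Chars.isspace (cs.getD i '\x00') then pvSkipFwdGo cs j fuel (i + 1) else i
    else i

def pvSkipFwd (cs : List Char) (j i : Nat) : Nat := pvSkipFwdGo cs j (j - i) i

-- while j > i and line[j-1].isspace(): j -= 1
def pvSkipBwdGo (cs : List Char) (i : Nat) : Nat → Nat → Nat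
  | 0, j => j
  | fuel + 1, j =>
    if i < j then
      if PySem.Chars.isspace (cs.getD (j - 1) '\x00') then pvSkipBwdGo cs i fuel (j - 1) else j
    else j

def pvSkipBwd (cs : List Char) (i j : Nat) : Nat := pvSkipBwdGo cs i (j - i) j

-- the main pointer loop of B (out is Source B's out list; appends happen in place;
-- the fuel only totalises the loop: i advances by at least 21 per iteration)
def pvWrapPtrGo (cs : List Char) : Nat → Nat → Nat → List String → List String
  | 0, _, _, out => out
  | fuel + 1, i, j, out =>
    if i < j then
      if j - i ≤ 40 then out ++ [String.ofList ((cs.drop i).take (j - i))]   -- line[i:j]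
      else
        let k := pvScanBack cs (i : Int) ((i : Int) + 40)
        let split : Nat := if k - (i : Int) > 20 then k.toNat else i + 40
        let p := pvSkipFwd cs split i
        let q := pvSkipBwd cs p split
        let i1 := pvSkipFwd cs j split
        let j1 := pvSkipBwd cs i1 j
        pvWrapPtrGo cs fuel i1 j1 (out ++ [String.ofList ((cs.drop p).take (q - p))])  -- line[p:q]
    else out

def pvWrapPtr (cs : List Char) (i j : Nat) (out : List String) : List String :=
  pvWrapPtrGo cs (j - i) i j out

def flatten_with_wrap_py_alt (raw_lines : List String) : List String :=
  raw_lines.foldl (fun out line =>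
    if line.toList.isEmpty then out ++ [""]
    else if line.toList.length ≤ 40 then out ++ [line]
    else pvWrapPtr line.toList 0 line.toList.length out) []

-- ===== PRECONDITION & SPEC =====
def Spec_flatten_with_wrap_py (raw_lines : List String) (out : List String) : Prop := out = flatten_with_wrap_py_alt raw_lines
instance (raw_lines : List String) (out : List String) : Decidable (Spec_flatten_with_wrap_py raw_lines out) := by unfold Spec_flatten_with_wrap_py; infer_instance

-- ===== CLAIM (what is proved, stated in full; the proofs are below) =====
def Claim_equal_flatten_with_wrap_py : Prop := ∀ (raw_lines : List String), Dom_flatten_with_wrap_py raw_lines → Spec_flatten_with_wrap_py raw_lines (flatten_with_wrap_py raw_lines)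

-- ===== LEMMAS AND PROOFS =====

-- strip never lengthens a list
lemma pvStripLen_le (cs : List Char) : (PySem.Chars.strip cs).length ≤ cs.length := by
  unfold PySem.Chars.strip PySem.Chars.rstrip PySem.Chars.lstrip
  calc ((List.dropWhile PySem.Chars.isspace
            (List.dropWhile PySem.Chars.isspace cs).reverse).reverse).length
      ≤ (List.dropWhile PySem.Chars.isspace cs).reverse.length := by
        rw [List.length_reverse]; exact List.length_dropWhile_le _ _
    _ ≤ cs.length := by rw [List.length_reverse]; exact List.length_dropWhile_le _ _

-- the new rest is strictly shorter: it is rest[split_at:].strip() with split_at ≥ 21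
lemma pvRestLen_lt (rest : List Char) (a : Int) (h21 : 21 ≤ a) (hne : 40 < rest.length) :
    (PySem.Chars.strip (PySem.List.slice rest (some a) none)).length < rest.length := by
  rw [PySem.List.slice_some_none]
  have h1 : 1 ≤ PySem.List.clampIdx rest.length a := by
    unfold PySem.List.clampIdx
    split_ifs with h <;> omega
  calc (PySem.Chars.strip (rest.drop (PySem.List.clampIdx rest.length a))).length
      ≤ (rest.drop (PySem.List.clampIdx rest.length a)).length := pvStripLen_le _
    _ = rest.length - PySem.List.clampIdx rest.length a := by rw [List.length_drop]
    _ < rest.length := by omega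

-- recover the while-loop recurrences from the fuelled definitions
lemma pvScanBack_eq (cs : List Char) (i k : Int) : pvScanBack cs i k =
    if i ≤ k then (if pvCharAt cs k = ' ' then k else pvScanBack cs i (k - 1)) else k := by
  unfold pvScanBack
  by_cases h : i ≤ k
  · have h1 : (k + 1 - i).toNat = (k - i).toNat + 1 := by omega
    rw [h1]
    simp only [pvScanBackGo]
    rw [if_pos h, if_pos h]
    by_cases hs : pvCharAt cs k = ' '
    · rw [if_pos hs, if_pos hs]
    · rw [if_neg hs, if_neg hs]
      congr 1
      omega
  · have h1 : (k + 1 - i).toNat = 0 := by omega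
    rw [h1]
    simp [pvScanBackGo, h]

lemma pvSkipFwd_eq (cs : List Char) (j i : Nat) : pvSkipFwd cs j i =
    if i < j then
      (if PySem.Chars.isspace (cs.getD i '\x00') then pvSkipFwd cs j (i + 1) else i)
    else i := by
  unfold pvSkipFwd
  by_cases h : i < j
  · have h1 : j - i = (j - (i + 1)) + 1 := by omega
    rw [h1]
    simp only [pvSkipFwdGo]
  · have h1 : j - i = 0 := by omega
    rw [h1]
    simp [pvSkipFwdGo, h]

lemma pvSkipBwd_eq (cs : List Char) (i j : Nat) : pvSkipBwd cs i j =
    if i < j then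
      (if PySem.Chars.isspace (cs.getD (j - 1) '\x00') then pvSkipBwd cs i (j - 1) else j)
    else j := by
  unfold pvSkipBwd
  by_cases h : i < j
  · have h1 : j - i = ((j - 1) - i) + 1 := by omega
    rw [h1]
    simp only [pvSkipBwdGo]
  · have h1 : j - i = 0 := by omega
    rw [h1]
    simp [pvSkipBwdGo, h]

lemma pvSkipFwd_ge (cs : List Char) (j : Nat) : ∀ i, i ≤ pvSkipFwd cs j i := by
  have hgo : ∀ f i, i ≤ pvSkipFwdGo cs j f i := by
    intro f
    induction f with
    | zero => intro i; exact le_refl i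
    | succ f ih =>
      intro i
      simp only [pvSkipFwdGo]
      split_ifs with h hs
      · have := ih (i + 1); omega
      · exact le_refl i
      · exact le_refl i
  intro i
  exact hgo _ i

lemma pvSkipFwd_le (cs : List Char) (j : Nat) : ∀ i, i ≤ j → pvSkipFwd cs j i ≤ j := by
  have hgo : ∀ f i, i ≤ j → pvSkipFwdGo cs j f i ≤ j := by
    intro f
    induction f with
    | zero => intro i hij; exact hij
    | succ f ih =>
      intro i hij
      simp only [pvSkipFwdGo]
      split_ifs with h hs
      · exact ih (i + 1) (by omega)
      · exact hij
      · exact hij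
  intro i hij
  exact hgo _ i hij

lemma pvSkipBwd_le (cs : List Char) (i : Nat) : ∀ j, pvSkipBwd cs i j ≤ j := by
  have hgo : ∀ f j, pvSkipBwdGo cs i f j ≤ j := by
    intro f
    induction f with
    | zero => intro j; exact le_refl j
    | succ f ih =>
      intro j
      simp only [pvSkipBwdGo]
      split_ifs with h hs
      · have := ih (j - 1); omega
      · exact le_refl j
      · exact le_refl j
  intro j
  exact hgo _ j

lemma pvSkipBwd_ge (cs : List Char) (i : Nat) : ∀ j, i ≤ j → i ≤ pvSkipBwd cs i j := by
  have hgo : ∀ f j, i ≤ j → i ≤ pvSkipBwdGo cs i f j := by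
    intro f
    induction f with
    | zero => intro j hij; exact hij
    | succ f ih =>
      intro j hij
      simp only [pvSkipBwdGo]
      split_ifs with h hs
      · exact ih (j - 1) (by omega)
      · exact hij
      · exact hij
  intro j hij
  exact hgo _ j hij

-- the scan stays between i - 1 and its start
lemma pvScanBack_le (cs : List Char) (i : Int) : ∀ k, i - 1 ≤ k → i - 1 ≤ pvScanBack cs i k ∧ pvScanBack cs i k ≤ k := by
  have hgo : ∀ f k, i - 1 ≤ k → i - 1 ≤ pvScanBackGo cs i f k ∧ pvScanBackGo cs i f k ≤ k := by
    intro f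
    induction f with
    | zero => intro k hk; exact ⟨hk, le_refl k⟩
    | succ f ih =>
      intro k hk
      simp only [pvScanBackGo]
      split_ifs with h hs
      · exact ⟨hk, le_refl k⟩
      · have := ih (k - 1) (by omega); omega
      · exact ⟨hk, le_refl k⟩
  intro k hk
  exact hgo _ k hk

lemma pvWrapLoopAGo_nil (f : Nat) (res : List (List Char)) : pvWrapLoopAGo f [] res = res := by
  cases f <;> simp [pvWrapLoopAGo]

-- any sufficient fuel computes the same wrap loop
lemma pvWrapLoopAGo_congr : ∀ (f g : Nat) (rest : List Char) (res : List (List Char)),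
    rest.length ≤ f → rest.length ≤ g → pvWrapLoopAGo f rest res = pvWrapLoopAGo g rest res := by
  intro f
  induction f with
  | zero =>
    intro g rest res hf hg
    have : rest = [] := by cases rest <;> simp_all
    subst this
    rw [pvWrapLoopAGo_nil, pvWrapLoopAGo_nil]
  | succ f ih =>
    intro g rest res hf hg
    by_cases h0 : rest = []
    · subst h0; rw [pvWrapLoopAGo_nil, pvWrapLoopAGo_nil]
    cases g with
    | zero =>
      exact absurd (by cases rest <;> simp_all : rest = []) h0
    | succ g =>
      simp only [pvWrapLoopAGo]
      rw [if_neg h0, if_neg h0]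
      by_cases h1 : rest.length ≤ 40
      · rw [if_pos h1, if_pos h1]
      · rw [if_neg h1, if_neg h1]
        have h21 : (21 : Int) ≤ (if PySem.Chars.rfind (PySem.List.slice rest none (some 41)) [' '] > 20
            then PySem.Chars.rfind (PySem.List.slice rest none (some 41)) [' '] else 40) := by
          split_ifs with h <;> omega
        have hlt := pvRestLen_lt rest _ h21 (by omega)
        exact ih g _ _ (by omega) (by omega)

lemma pvWrapLoopA_nil (res : List (List Char)) : pvWrapLoopA [] res = res := by
  unfold pvWrapLoopA
  exact pvWrapLoopAGo_nil _ res

-- the loop recurrence of _wrap_line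
lemma pvWrapLoopA_eq (rest : List Char) (res : List (List Char)) : pvWrapLoopA rest res =
    if rest = [] then res
    else if rest.length ≤ 40 then res ++ [rest]
    else
      pvWrapLoopA
        (PySem.Chars.strip (PySem.List.slice rest
          (some (if PySem.Chars.rfind (PySem.List.slice rest none (some 41)) [' '] > 20
            then PySem.Chars.rfind (PySem.List.slice rest none (some 41)) [' '] else 40)) none))
        (res ++ [PySem.Chars.strip (PySem.List.slice rest none
          (some (if PySem.Chars.rfind (PySem.List.slice rest none (some 41)) [' '] > 20
            then PySem.Chars.rfind (PySem.List.slice rest none (some 41)) [' '] else 40)))]) := by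
  by_cases h0 : rest = []
  · subst h0; rw [pvWrapLoopA_nil, if_pos rfl]
  rw [if_neg h0]
  rcases hm : rest.length with _ | m
  · exact absurd (by cases rest <;> simp_all : rest = []) h0
  conv_lhs => rw [pvWrapLoopA, hm]
  simp only [pvWrapLoopAGo]
  rw [if_neg h0]
  by_cases h1 : rest.length ≤ 40
  · rw [if_pos h1, if_pos (show m + 1 ≤ 40 by omega)]
  · rw [if_neg h1, if_neg (show ¬ m + 1 ≤ 40 by omega)]
    unfold pvWrapLoopA
    have h21 : (21 : Int) ≤ (if PySem.Chars.rfind (PySem.List.slice rest none (some 41)) [' '] > 20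
        then PySem.Chars.rfind (PySem.List.slice rest none (some 41)) [' '] else 40) := by
      split_ifs with h <;> omega
    have hlt := pvRestLen_lt rest _ h21 (by omega)
    exact pvWrapLoopAGo_congr m _ _ _ (by omega) (le_refl _)

-- any sufficient fuel computes the same pointer loop
lemma pvWrapPtrGo_congr (cs : List Char) : ∀ (f g i j : Nat) (out : List String),
    j - i ≤ f → j - i ≤ g → pvWrapPtrGo cs f i j out = pvWrapPtrGo cs g i j out := by
  intro f
  induction f with
  | zero =>
    intro g i j out hf hg
    have hij : ¬ i < j := by omega
    cases g with
    | zero => rfl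
    | succ g => simp only [pvWrapPtrGo]; rw [if_neg hij]
  | succ f ih =>
    intro g i j out hf hg
    by_cases hij : i < j
    swap
    · cases g with
      | zero => simp only [pvWrapPtrGo]; rw [if_neg hij]
      | succ g => simp only [pvWrapPtrGo]; rw [if_neg hij, if_neg hij]
    cases g with
    | zero => omega
    | succ g =>
      simp only [pvWrapPtrGo]
      rw [if_pos hij, if_pos hij]
      by_cases h40 : j - i ≤ 40
      · rw [if_pos h40, if_pos h40]
      · rw [if_neg h40, if_neg h40]
        have hk := pvScanBack_le cs (i : Int) ((i : Int) + 40) (by omega)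
        have hsplit : i + 21 ≤ (if pvScanBack cs (i : Int) ((i : Int) + 40) - (i : Int) > 20
            then (pvScanBack cs (i : Int) ((i : Int) + 40)).toNat else i + 40) := by
          split_ifs with h <;> omega
        have h1 := pvSkipFwd_ge cs j (if pvScanBack cs (i : Int) ((i : Int) + 40) - (i : Int) > 20
            then (pvScanBack cs (i : Int) ((i : Int) + 40)).toNat else i + 40)
        have h2 := pvSkipBwd_le cs (pvSkipFwd cs j (if pvScanBack cs (i : Int) ((i : Int) + 40) - (i : Int) > 20
            then (pvScanBack cs (i : Int) ((i : Int) + 40)).toNat else i + 40)) j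
        exact ih g _ _ _ (by omega) (by omega)

-- the loop recurrence of B's pointer loop
lemma pvWrapPtr_eq (cs : List Char) (i j : Nat) (out : List String) : pvWrapPtr cs i j out =
    if i < j then
      if j - i ≤ 40 then out ++ [String.ofList ((cs.drop i).take (j - i))]
      else
        pvWrapPtr cs
          (pvSkipFwd cs j (if pvScanBack cs (i : Int) ((i : Int) + 40) - (i : Int) > 20
            then (pvScanBack cs (i : Int) ((i : Int) + 40)).toNat else i + 40))
          (pvSkipBwd cs (pvSkipFwd cs j (if pvScanBack cs (i : Int) ((i : Int) + 40) - (i : Int) > 20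
            then (pvScanBack cs (i : Int) ((i : Int) + 40)).toNat else i + 40)) j)
          (out ++ [String.ofList ((cs.drop (pvSkipFwd cs (if pvScanBack cs (i : Int) ((i : Int) + 40) - (i : Int) > 20
              then (pvScanBack cs (i : Int) ((i : Int) + 40)).toNat else i + 40) i)).take
            (pvSkipBwd cs (pvSkipFwd cs (if pvScanBack cs (i : Int) ((i : Int) + 40) - (i : Int) > 20
              then (pvScanBack cs (i : Int) ((i : Int) + 40)).toNat else i + 40) i)
              (if pvScanBack cs (i : Int) ((i : Int) + 40) - (i : Int) > 20
              then (pvScanBack cs (i : Int) ((i : Int) + 40)).toNat else i + 40) -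
             pvSkipFwd cs (if pvScanBack cs (i : Int) ((i : Int) + 40) - (i : Int) > 20
              then (pvScanBack cs (i : Int) ((i : Int) + 40)).toNat else i + 40) i))])
    else out := by
  by_cases hij : i < j
  swap
  · rw [if_neg hij]
    unfold pvWrapPtr
    have h0 : j - i = 0 := by omega
    rw [h0]
    rfl
  rcases hd : j - i with _ | m
  · omega
  rw [if_pos hij]
  conv_lhs => rw [pvWrapPtr, hd]
  simp only [pvWrapPtrGo]
  rw [if_pos hij]
  by_cases h40 : j - i ≤ 40
  · rw [if_pos h40, if_pos (show m + 1 ≤ 40 by omega), hd]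
  · rw [if_neg h40, if_neg (show ¬ m + 1 ≤ 40 by omega)]
    unfold pvWrapPtr
    have hk := pvScanBack_le cs (i : Int) ((i : Int) + 40) (by omega)
    have hsplit : i + 21 ≤ (if pvScanBack cs (i : Int) ((i : Int) + 40) - (i : Int) > 20
        then (pvScanBack cs (i : Int) ((i : Int) + 40)).toNat else i + 40) := by
      split_ifs with h <;> omega
    have h1 := pvSkipFwd_ge cs j (if pvScanBack cs (i : Int) ((i : Int) + 40) - (i : Int) > 20
        then (pvScanBack cs (i : Int) ((i : Int) + 40)).toNat else i + 40)
    have h2 := pvSkipBwd_le cs (pvSkipFwd cs j (if pvScanBack cs (i : Int) ((i : Int) + 40) - (i : Int) > 20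
        then (pvScanBack cs (i : Int) ((i : Int) + 40)).toNat else i + 40)) j
    exact pvWrapPtrGo_congr cs m _ _ _ _ (by omega) (by omega)

lemma pvDropWhile_eq_drop (p : Char → Bool) (l : List Char) :
    l.dropWhile p = l.drop (l.takeWhile p).length := by
  induction l with
  | nil => simp
  | cons a t ih => by_cases h : p a <;> simp [h, ih]

lemma pvRevDrop (l : List Char) (n : Nat) : (l.reverse.drop n).reverse = l.take (l.length - n) := by
  rw [List.reverse_drop]; simp

lemma pvGetD_in (cs : List Char) (n : Nat) (h : n < cs.length) : cs.getD n '\x00' = cs[n] := by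
  simp [List.getD_eq_getElem?_getD, List.getElem?_eq_getElem h]

-- the chars of line[i:j] seen through cs
lemma pvSub_getElem? (cs : List Char) (i r t : Nat) (hr : r < t) :
    ((cs.drop i).take t)[r]? = cs[i + r]? := by
  rw [List.getElem?_take_of_lt hr, List.getElem?_drop]

lemma pvSkipFwd_specAux (cs : List Char) (q : Nat) : ∀ (n p : Nat), q - p ≤ n → p ≤ q → q ≤ cs.length →
    pvSkipFwd cs q p = p + (((cs.drop p).take (q - p)).takeWhile PySem.Chars.isspace).length := by
  intro n
  induction n with
  | zero =>
    intro p hn hpq hq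
    have hz : q - p = 0 := by omega
    rw [pvSkipFwd_eq, if_neg (by omega), hz]
    simp
  | succ n ih =>
    intro p hn hpq hq
    by_cases h : p < q
    swap
    · have hz : q - p = 0 := by omega
      rw [pvSkipFwd_eq, if_neg h, hz]
      simp
    have hp : p < cs.length := by omega
    have hdec : (cs.drop p).take (q - p) = cs[p] :: ((cs.drop (p + 1)).take (q - (p + 1))) := by
      rw [List.drop_eq_getElem_cons hp]
      have : q - p = (q - (p + 1)) + 1 := by omega
      rw [this, List.take_succ_cons]
    by_cases hs : PySem.Chars.isspace (cs.getD p '\x00')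
    · rw [pvSkipFwd_eq, if_pos h, if_pos hs, hdec, List.takeWhile_cons,
        if_pos (by rwa [pvGetD_in cs p hp] at hs), ih (p + 1) (by omega) (by omega) hq]
      simp; omega
    · rw [pvSkipFwd_eq, if_pos h, if_neg hs, hdec, List.takeWhile_cons,
        if_neg (by rwa [pvGetD_in cs p hp] at hs)]
      simp

lemma pvSkipFwd_spec (cs : List Char) (q : Nat) : ∀ p, p ≤ q → q ≤ cs.length →
    pvSkipFwd cs q p = p + (((cs.drop p).take (q - p)).takeWhile PySem.Chars.isspace).length :=
  fun p hpq hq => pvSkipFwd_specAux cs q (q - p) p (le_refl _) hpq hq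

lemma pvSkipBwd_specAux (cs : List Char) (p : Nat) : ∀ (n q : Nat), q - p ≤ n → p ≤ q → q ≤ cs.length →
    pvSkipBwd cs p q = q - (((cs.drop p).take (q - p)).reverse.takeWhile PySem.Chars.isspace).length := by
  intro n
  induction n with
  | zero =>
    intro q hn hpq hq
    have hz : q - p = 0 := by omega
    rw [pvSkipBwd_eq, if_neg (by omega), hz]
    simp
  | succ n ih =>
    intro q hn hpq hq
    by_cases h : p < q
    swap
    · have hz : q - p = 0 := by omega
      rw [pvSkipBwd_eq, if_neg h, hz]
      simp
    have hq1 : q - 1 < cs.length := by omega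
    have hdec : (cs.drop p).take (q - p) = ((cs.drop p).take (q - 1 - p)) ++ [cs[q - 1]] := by
      have h1 : q - p = (q - 1 - p) + 1 := by omega
      rw [h1, List.take_add_one, List.getElem?_drop]
      have h2 : p + (q - 1 - p) = q - 1 := by omega
      rw [h2, List.getElem?_eq_getElem hq1]
      simp
    by_cases hs : PySem.Chars.isspace (cs.getD (q - 1) '\x00')
    · have hlenrest : (((cs.drop p).take (q - 1 - p)).reverse.takeWhile PySem.Chars.isspace).length ≤ q - 1 - p := by
        calc (((cs.drop p).take (q - 1 - p)).reverse.takeWhile PySem.Chars.isspace).length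
            ≤ ((cs.drop p).take (q - 1 - p)).reverse.length := (List.takeWhile_prefix _).length_le
          _ ≤ q - 1 - p := by simp
      rw [pvSkipBwd_eq, if_pos h, if_pos hs, hdec, List.reverse_append]
      simp only [List.reverse_cons, List.reverse_nil, List.nil_append, List.singleton_append,
        List.takeWhile_cons]
      rw [if_pos (by rwa [pvGetD_in cs (q - 1) hq1] at hs), ih (q - 1) (by omega) (by omega) (by omega)]
      simp; omega
    · rw [pvSkipBwd_eq, if_pos h, if_neg hs, hdec, List.reverse_append]
      simp only [List.reverse_cons, List.reverse_nil, List.nil_append, List.singleton_append,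
        List.takeWhile_cons]
      rw [if_neg (by rwa [pvGetD_in cs (q - 1) hq1] at hs)]
      simp

lemma pvSkipBwd_spec (cs : List Char) (p : Nat) : ∀ q, p ≤ q → q ≤ cs.length →
    pvSkipBwd cs p q = q - (((cs.drop p).take (q - p)).reverse.takeWhile PySem.Chars.isspace).length :=
  fun q hpq hq => pvSkipBwd_specAux cs p (q - p) q (le_refl _) hpq hq

-- Python's strip of line[p:q] just moves the two pointers inward
lemma pvStrip_slice (cs : List Char) (p q : Nat) (hpq : p ≤ q) (hq : q ≤ cs.length) :
    PySem.Chars.strip ((cs.drop p).take (q - p)) =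
      (cs.drop (pvSkipFwd cs q p)).take (pvSkipBwd cs (pvSkipFwd cs q p) q - pvSkipFwd cs q p) := by
  have hfwd := pvSkipFwd_spec cs q p hpq hq
  set tl := (((cs.drop p).take (q - p)).takeWhile PySem.Chars.isspace).length with htl
  have htl_le : tl ≤ q - p := by
    calc tl ≤ ((cs.drop p).take (q - p)).length := (List.takeWhile_prefix _).length_le
      _ ≤ q - p := by simp
  set p' := pvSkipFwd cs q p with hp'
  have hp'val : p' = p + tl := hfwd
  have hp'le : p' ≤ q := by omega
  have hlstrip : PySem.Chars.lstrip ((cs.drop p).take (q - p)) = (cs.drop p').take (q - p') := by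
    unfold PySem.Chars.lstrip
    rw [pvDropWhile_eq_drop, ← htl, List.drop_take, List.drop_drop, hp'val]
    have e1 : q - p - tl = q - (p + tl) := by omega
    rw [e1]
  have hbwd := pvSkipBwd_spec cs p' q hp'le hq
  set tr := (((cs.drop p').take (q - p')).reverse.takeWhile PySem.Chars.isspace).length with htr
  have htr_le : tr ≤ q - p' := by
    calc tr ≤ ((cs.drop p').take (q - p')).reverse.length := (List.takeWhile_prefix _).length_le
      _ ≤ q - p' := by simp
  have hlen' : ((cs.drop p').take (q - p')).length = q - p' := by
    simp; omega
  unfold PySem.Chars.strip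
  rw [hlstrip]
  unfold PySem.Chars.rstrip
  rw [pvDropWhile_eq_drop, ← htr, pvRevDrop, hlen', List.take_take, hbwd]
  congr 1
  omega

-- [c] is a prefix exactly when the head is c
lemma pvIsPrefixSingle (c : Char) (l : List Char) : [c].isPrefixOf l = (l.head? == some c) := by
  cases l with
  | nil => simp [List.isPrefixOf]
  | cons a t => simp [List.isPrefixOf, BEq.comm]

-- rfind.go on a single space is B's backward index scan
lemma pvRfind_go_eq (cs chunk : List Char) (i : Nat) :
    ∀ m : Nat, i + m < cs.length → (∀ r, r ≤ m → chunk[r]? = cs[i + r]?) →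
    PySem.Chars.rfind.go chunk [' '] m = pvScanBack cs (i : Int) ((i : Int) + m) - i := by
  intro m
  induction m with
  | zero =>
    intro hm hr
    simp only [Nat.cast_zero, add_zero]
    have hc : chunk[0]? = some cs[i] := by
      rw [hr 0 (le_refl 0)]
      simp
    have hchar : pvCharAt cs (i : Int) = cs[i] := by
      unfold pvCharAt
      have : ((i : Int)).toNat = i := by omega
      rw [this, pvGetD_in cs i (by omega)]
    rw [PySem.Chars.rfind.go]
    by_cases hsp : cs[i] = ' '
    · rw [if_pos (by rw [pvIsPrefixSingle]; simp [List.head?_eq_getElem?, hc, hsp])]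
      rw [pvScanBack_eq, if_pos (by omega), if_pos (by rw [hchar]; exact hsp)]
      omega
    · rw [if_neg (by rw [pvIsPrefixSingle]; simp [List.head?_eq_getElem?, hc]; exact hsp)]
      rw [pvScanBack_eq, if_pos (by omega), if_neg (by rw [hchar]; exact hsp)]
      rw [pvScanBack_eq, if_neg (by omega)]
      omega
  | succ n ih =>
    intro hm hr
    have hin : i + (n + 1) < cs.length := hm
    have hc : chunk[n + 1]? = some cs[i + (n + 1)] := by
      rw [hr (n + 1) (le_refl _)]
      exact List.getElem?_eq_getElem hin
    have hchar : pvCharAt cs ((i : Int) + (n + 1 : Nat)) = cs[i + (n + 1)] := by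
      unfold pvCharAt
      have : ((i : Int) + (n + 1 : Nat)).toNat = i + (n + 1) := by omega
      rw [this, pvGetD_in cs (i + (n + 1)) hin]
    rw [PySem.Chars.rfind.go]
    by_cases hsp : cs[i + (n + 1)] = ' '
    · rw [if_pos (by rw [pvIsPrefixSingle]; simp [List.head?_eq_getElem?, hc, hsp])]
      rw [pvScanBack_eq, if_pos (by omega), if_pos (by rw [hchar]; exact hsp)]
      omega
    · rw [if_neg (by rw [pvIsPrefixSingle]; simp [List.head?_eq_getElem?, hc]; exact hsp)]
      rw [pvScanBack_eq, if_pos (by omega), if_neg (by rw [hchar]; exact hsp)]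
      have harg : (i : Int) + (n + 1 : Nat) - 1 = (i : Int) + (n : Nat) := by omega
      rw [harg, ih (by omega) (fun r hrle => hr r (by omega))]

lemma pvRfind_eq_scan (cs chunk : List Char) (i : Nat)
    (hlen : chunk.length = 41) (hrange : i + 40 < cs.length)
    (hr : ∀ r, r ≤ 40 → chunk[r]? = cs[i + r]?) :
    PySem.Chars.rfind chunk [' '] = pvScanBack cs (i : Int) ((i : Int) + 40) - i := by
  unfold PySem.Chars.rfind
  rw [hlen]
  rw [PySem.Chars.rfind.go]
  rw [if_neg (by rw [pvIsPrefixSingle]; simp [List.head?_eq_getElem?, hlen])]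
  exact pvRfind_go_eq cs chunk i 40 hrange hr

-- A's loop with accumulator res prepends res
lemma pvWrapLoopA_acc : ∀ (n : Nat) (rest : List Char), rest.length ≤ n →
    ∀ res, pvWrapLoopA rest res = res ++ pvWrapLoopA rest [] := by
  intro n
  induction n with
  | zero =>
    intro rest hlen res
    have : rest = [] := by cases rest <;> simp_all
    subst this
    rw [pvWrapLoopA_nil, pvWrapLoopA_nil]
    simp
  | succ n ih =>
    intro rest hlen res
    by_cases h0 : rest = []
    · subst h0; rw [pvWrapLoopA_nil, pvWrapLoopA_nil]; simp
    by_cases h1 : rest.length ≤ 40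
    · rw [pvWrapLoopA_eq rest res, pvWrapLoopA_eq rest [], if_neg h0, if_neg h0,
        if_pos h1, if_pos h1]
      simp
    · rw [pvWrapLoopA_eq rest res, pvWrapLoopA_eq rest [], if_neg h0, if_neg h0,
        if_neg h1, if_neg h1]
      have h21 : (21 : Int) ≤ (if PySem.Chars.rfind (PySem.List.slice rest none (some 41)) [' '] > 20
          then PySem.Chars.rfind (PySem.List.slice rest none (some 41)) [' '] else 40) := by
        split_ifs with h <;> omega
      have hlt := pvRestLen_lt rest _ h21 (by omega)
      rw [ih _ (by omega), ih _ (by omega) ([] ++ _)]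
      simp

lemma pvSliceNoneSome (l : List Char) (b : Nat) :
    PySem.List.slice l none (some (b : Int)) = l.take b := by
  rw [PySem.List.slice_to l (by omega : (0:Int) ≤ (b : Int))]
  simp

lemma pvSliceSomeNone' (l : List Char) (a : Nat) :
    PySem.List.slice l (some (a : Int)) none = l.drop a := by
  rw [PySem.List.slice_some_none]
  unfold PySem.List.clampIdx
  rw [if_neg (by omega : ¬ ((a : Int) < 0)), Int.toNat_natCast]
  rcases Nat.le_total a l.length with h | h
  · rw [min_eq_left h]
  · rw [min_eq_right h, List.drop_length, List.drop_eq_nil_of_le h]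

-- the single iteration step, shared by both branches of the split decision
lemma pvStepEq (cs : List Char) (i j sa : Nat) (out : List String)
    (h21 : 21 ≤ sa) (h40 : sa ≤ 40) (hgt : 40 < j - i) (hj : j ≤ cs.length)
    (ih : ∀ (i' j' : Nat) (out' : List String), j' - i' ≤ j - i - 21 → i' ≤ j' → j' ≤ cs.length →
      pvWrapPtr cs i' j' out' = out' ++ (pvWrapLoopA ((cs.drop i') |>.take (j' - i')) []).map String.ofList) :
    pvWrapPtr cs (pvSkipFwd cs j (i + sa)) (pvSkipBwd cs (pvSkipFwd cs j (i + sa)) j)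
        (out ++ [String.ofList ((cs.drop (pvSkipFwd cs (i + sa) i)).take
          (pvSkipBwd cs (pvSkipFwd cs (i + sa) i) (i + sa) - pvSkipFwd cs (i + sa) i))]) =
      out ++ (pvWrapLoopA
        (PySem.Chars.strip (PySem.List.slice ((cs.drop i).take (j - i)) (some (sa : Int)) none))
        ([] ++ [PySem.Chars.strip (PySem.List.slice ((cs.drop i).take (j - i)) none (some (sa : Int)))])).map String.ofList := by
  have hsublen : ((cs.drop i).take (j - i)).length = j - i := by simp; omega
  -- A's piece is B's line[p:q]
  have hpiece : PySem.Chars.strip (PySem.List.slice ((cs.drop i).take (j - i)) none (some (sa : Int)))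
      = (cs.drop (pvSkipFwd cs (i + sa) i)).take
          (pvSkipBwd cs (pvSkipFwd cs (i + sa) i) (i + sa) - pvSkipFwd cs (i + sa) i) := by
    rw [pvSliceNoneSome _ sa, List.take_take]
    have hmin : min sa (j - i) = (i + sa) - i := by omega
    rw [hmin, pvStrip_slice cs i (i + sa) (by omega) (by omega)]
  -- A's new rest is B's line[i1:j1]
  have hrest : PySem.Chars.strip (PySem.List.slice ((cs.drop i).take (j - i)) (some (sa : Int)) none)
      = (cs.drop (pvSkipFwd cs j (i + sa))).take
          (pvSkipBwd cs (pvSkipFwd cs j (i + sa)) j - pvSkipFwd cs j (i + sa)) := by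
    rw [pvSliceSomeNone', List.drop_take, List.drop_drop]
    have e1 : j - i - sa = j - (i + sa) := by omega
    rw [e1, pvStrip_slice cs (i + sa) j (by omega) hj]
  rw [hpiece, hrest]
  -- bounds for the recursive call
  have hi1_le_j : pvSkipFwd cs j (i + sa) ≤ j := pvSkipFwd_le cs j (i + sa) (by omega)
  have hi1_ge : i + sa ≤ pvSkipFwd cs j (i + sa) := pvSkipFwd_ge cs j (i + sa)
  have hj1_le : pvSkipBwd cs (pvSkipFwd cs j (i + sa)) j ≤ j := pvSkipBwd_le cs _ j
  have hj1_ge : pvSkipFwd cs j (i + sa) ≤ pvSkipBwd cs (pvSkipFwd cs j (i + sa)) j :=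
    pvSkipBwd_ge cs _ j hi1_le_j
  rw [ih _ _ _ (by omega) hj1_ge (by omega)]
  simp only [List.nil_append]
  rw [pvWrapLoopA_acc (List.take (pvSkipBwd cs (pvSkipFwd cs j (i + sa)) j - pvSkipFwd cs j (i + sa))
        (List.drop (pvSkipFwd cs j (i + sa)) cs)).length _ le_rfl
        [List.take (pvSkipBwd cs (pvSkipFwd cs (i + sa) i) (i + sa) - pvSkipFwd cs (i + sa) i)
          (List.drop (pvSkipFwd cs (i + sa) i) cs)]]
  simp

-- the core correspondence: B's pointer loop computes A's wrap loop on line[i:j]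
lemma pvMain (cs : List Char) : ∀ (n i j : Nat) (out : List String), j - i ≤ n → i ≤ j → j ≤ cs.length →
    pvWrapPtr cs i j out = out ++ (pvWrapLoopA ((cs.drop i).take (j - i)) []).map String.ofList := by
  intro n
  induction n with
  | zero =>
    intro i j out hn hij hj
    have : i = j := by omega
    subst this
    rw [pvWrapPtr_eq, if_neg (by omega)]
    simp [pvWrapLoopA_nil]
  | succ n ih =>
    intro i j out hn hij hj
    by_cases hlt : i < j
    swap
    · rw [pvWrapPtr_eq, if_neg hlt]
      have : j - i = 0 := by omega
      rw [this]
      simp [pvWrapLoopA_nil]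
    have hsublen : ((cs.drop i).take (j - i)).length = j - i := by simp; omega
    have hsubne : (cs.drop i).take (j - i) ≠ [] := by
      intro hnil
      rw [hnil] at hsublen
      simp at hsublen
      omega
    by_cases h40 : j - i ≤ 40
    · rw [pvWrapPtr_eq, if_pos hlt, if_pos h40]
      conv_rhs => rw [pvWrapLoopA_eq]
      rw [if_neg hsubne,
        if_pos (show (List.take (j - i) (List.drop i cs)).length ≤ 40 from by rw [hsublen]; exact h40)]
      simp
    · -- the wrapping branch
      rw [pvWrapPtr_eq, if_pos hlt, if_neg h40]
      conv_rhs => rw [pvWrapLoopA_eq]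
      rw [if_neg hsubne,
        if_neg (show ¬ (List.take (j - i) (List.drop i cs)).length ≤ 40 from by rw [hsublen]; exact h40)]
      -- the chunk is line[i : i+41]
      have hchunk : PySem.List.slice ((cs.drop i).take (j - i)) none (some 41) = (cs.drop i).take 41 := by
        have h41 : (41 : Int) = ((41 : Nat) : Int) := by norm_num
        rw [h41, pvSliceNoneSome _ 41, List.take_take]
        congr 1
        omega
      have hrfind : PySem.Chars.rfind (PySem.List.slice ((cs.drop i).take (j - i)) none (some 41)) [' ']
          = pvScanBack cs (i : Int) ((i : Int) + 40) - i := by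
        rw [hchunk]
        refine pvRfind_eq_scan cs _ i (by simp; omega) (by omega) ?_
        intro r hr
        exact pvSub_getElem? cs i r 41 (by omega)
      rw [hrfind]
      have hkb := pvScanBack_le cs (i : Int) ((i : Int) + 40) (by omega)
      have ih' : ∀ (i' j' : Nat) (out' : List String), j' - i' ≤ j - i - 21 → i' ≤ j' → j' ≤ cs.length →
          pvWrapPtr cs i' j' out' = out' ++ (pvWrapLoopA ((cs.drop i') |>.take (j' - i')) []).map String.ofList :=
        fun i' j' out' h1 h2 h3 => ih i' j' out' (by omega) h2 h3
      by_cases hks : pvScanBack cs (i : Int) ((i : Int) + 40) - (i : Int) > 20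
      · rw [if_pos hks, if_pos hks]
        set k := pvScanBack cs (i : Int) ((i : Int) + 40) with hk
        have hsa : k.toNat = i + (k - (i : Int)).toNat := by omega
        have hsaInt : k - (i : Int) = (((k - (i : Int)).toNat : Nat) : Int) := by omega
        rw [hsa, hsaInt]
        exact pvStepEq cs i j (k - (i : Int)).toNat out (by omega) (by omega) (by omega) hj ih'
      · rw [if_neg hks, if_neg hks]
        have h40' : (40 : Int) = ((40 : Nat) : Int) := by norm_num
        rw [h40']
        exact pvStepEq cs i j 40 out (by omega) (by omega) (by omega) hj ih'

-- per-line agreement of the two fold steps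
lemma pvStep_line (out : List String) (line : String) :
    (if line.toList.isEmpty then out ++ [""]
      else out ++ (pvWrapLineA line.toList).map String.ofList) =
    (if line.toList.isEmpty then out ++ [""]
      else if line.toList.length ≤ 40 then out ++ [line]
      else pvWrapPtr line.toList 0 line.toList.length out) := by
  by_cases h0 : line.toList.isEmpty
  · rw [if_pos h0, if_pos h0]
  rw [if_neg h0, if_neg h0]
  by_cases h1 : line.toList.length ≤ 40
  · unfold pvWrapLineA
    have h1' : line.length ≤ 40 := by simpa using h1
    simp [h0, h1', String.ofList_toList]
  · have h1' : ¬ line.length ≤ 40 := by simpa using h1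
    have hA : pvWrapLineA line.toList = pvWrapLoopA line.toList [] := by
      unfold pvWrapLineA
      rw [if_neg (by simp [h0]; omega)]
    rw [hA, if_neg h1]
    rw [pvMain line.toList line.toList.length 0 line.toList.length out (by omega) (by omega) (le_refl _)]
    have htk : List.take line.length line.toList = line.toList := by
      have he : line.length = line.toList.length := by simp
      rw [he, List.take_length]
    simp [htk]

-- ===== VERDICT (by name: the statement is the Claim_ definition above) =====
theorem flatten_with_wrap_py_spec : Claim_equal_flatten_with_wrap_py := by
  intro raw_lines _hdom
  clear _hdom
  unfold Spec_flatten_with_wrap_py flatten_with_wrap_py flatten_with_wrap_py_alt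
  induction raw_lines using List.reverseRecOn with
  | nil => rfl
  | append_singleton ls line ih =>
    rw [List.foldl_append, List.foldl_append, ← ih]
    simp only [List.foldl_cons, List.foldl_nil]
    exact pvStep_line _ line
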